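-- pv_equiv track=rewrite | github.com/matzayonc/agh | asd/graphs/graphs.py | vertices_with_time
-- ===== SOURCE A (Python) =====
-- from collections import deque
--
-- def vertices_with_time(G):
--     Q = deque([])
--     V = [None for _ in G]
--
--     t = 0  # timer for timing visits
--
--     for i in range(len(G)):
--         if V[i] == None:
--             Q.append(i)
--
--             while Q:
--                 q = Q.pop()
--                 if V[q] != None:
--                     continue
--                 V[q] = t
--                 t += 1
--
--                 for v in G[q]:
--                     Q.append(v)
--
--     return V
-- ===== SOURCE B (Python) =====
-- def vertices_with_time(G):
--     # Two-phase DFS: phase 1 computes the discovery ORDER with boolean seen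
--     # flags and a stack of (vertex, countdown neighbour index) frames
--     # (mark-on-entry); phase 2 scatters positions in that order into V.
--     n = len(G)
--     seen = [False] * n
--     order = []
--     for s in range(n):
--         if seen[s]:
--             continue
--         seen[s] = True
--         order.append(s)
--         frames = [(s, len(G[s]) - 1)]
--         while frames:
--             u, k = frames[-1]
--             if k < 0:
--                 frames.pop()
--                 continue
--             frames[-1] = (u, k - 1)
--             v = G[u][k]
--             if not seen[v]:
--                 seen[v] = True
--                 order.append(v)
--                 frames.append((v, len(G[v]) - 1))
--     V = [0] * n
--     for time, u in enumerate(order):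
--         V[u] = time
--     return V
-- ===== Notes on version B (the rewrite author's own statement) =====
-- stated objective: alternative
-- what changed: A runs a flat deque of raw neighbour entries over an Option-timer array, marking vertices on pop; B splits the job in two passes: a boolean-seen DFS with (vertex, countdown-index) frames that records only the discovery ORDER (mark-on-entry, no duplicate stack entries), then a scatter pass that writes each vertex's position in that order into the result.
import Mathlib
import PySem

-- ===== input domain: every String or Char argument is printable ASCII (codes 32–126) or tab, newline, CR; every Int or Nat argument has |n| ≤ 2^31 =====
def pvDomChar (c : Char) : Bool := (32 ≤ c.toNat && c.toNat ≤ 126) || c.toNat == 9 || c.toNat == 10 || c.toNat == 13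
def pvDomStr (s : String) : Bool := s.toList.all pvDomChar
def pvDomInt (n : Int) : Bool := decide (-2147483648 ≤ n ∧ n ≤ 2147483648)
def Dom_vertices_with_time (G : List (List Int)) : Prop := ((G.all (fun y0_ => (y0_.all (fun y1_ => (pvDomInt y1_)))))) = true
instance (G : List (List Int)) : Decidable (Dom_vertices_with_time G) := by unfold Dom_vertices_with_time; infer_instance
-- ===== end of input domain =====

-- B replaces A's flat deque of raw neighbour entries over an Option-timer array (mark on pop)
-- by a two-phase computation: a boolean-seen DFS with (vertex, countdown-index) frames that
-- records only the discovery ORDER (mark on entry), then a scatter pass turning positions in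
-- that order into the labels; objective: alternative (same O(V+E) time, O(V) not O(E) stack).

-- Termination helper shared by both ports: overwriting (at a valid Python index) a cell on
-- which P holds with a value on which P fails shrinks the P-count.
theorem pvCountP_pySetD_lt {α : Type} (P : α → Bool) (xs : List α) (i : Int) (x y : α)
    (h : PySem.List.pyGet? xs i = some x) (hPx : P x = true) (hPy : P y = false) :
    (PySem.List.pySetD xs i y).countP P < xs.countP P := by
  unfold PySem.List.pyGet? at h
  cases hk : PySem.List.pyIdx? xs.length i with
  | none => rw [hk] at h; simp at h
  | some k =>
    rw [hk] at h
    simp only [Option.bind_some] at h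
    have hklt : k < xs.length := by
      unfold PySem.List.pyIdx? at hk; split at hk <;> simp_all <;> omega
    have hxk : xs[k] = x := by
      rw [List.getElem?_eq_getElem hklt] at h; exact Option.some.inj h
    have hpos : 0 < xs.countP P := by
      rw [List.countP_pos_iff]
      exact ⟨x, hxk ▸ List.getElem_mem hklt, hPx⟩
    unfold PySem.List.pySetD PySem.List.pySet?
    rw [hk]
    simp only [Option.map_some, Option.getD_some]
    rw [List.countP_set hklt, hxk, hPx, hPy]
    rw [if_pos rfl, if_neg Bool.false_ne_true]
    omega

-- ===== PORT A =====

/-- Number of still-unvisited cells (A's termination measure). -/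
def pvUnvis (V : List (Option Int)) : Nat := V.countP (fun o => o.isNone)

/-- The `while Q:` loop of A. The deque is represented top-first (Python appends right and
pops right, so pushing `G[q]` left-to-right is prepending `G[q].reverse`); an out-of-range
index (Python's IndexError, excluded by `Pre_`) stops with the current state. -/
def pvLoopA (G : List (List Int)) (Q : List Int) (V : List (Option Int)) (t : Int) :
    List (Option Int) × Int :=
  match Q with
  | [] => (V, t)
  | q :: S =>
    match h : PySem.List.pyGet? V q with
    | none => (V, t)                                   -- IndexError: V[q]
    | some (some _) =>
        pvLoopA G S V t                                -- if V[q] != None: continue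
    | some none =>
        pvLoopA G ((PySem.List.pyGetD G q []).reverse ++ S)
          (PySem.List.pySetD V q (some t)) (t + 1)     -- V[q] = t; push G[q]
  termination_by (pvUnvis V, Q.length)
  decreasing_by
  · exact Prod.Lex.right _ (by simp)
  · exact Prod.Lex.left _ _ (pvCountP_pySetD_lt _ V q none (some t) h rfl rfl)

def vertices_with_time (G : List (List Int)) : List Int :=
  let init : List (Option Int) := G.map (fun _ => none)   -- V = [None for _ in G]
  let r := (PySem.List.pyRange 0 G.length 1).foldl
    (fun p i =>
      if PySem.List.pyGetD p.1 i none = none then        -- if V[i] == None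
        pvLoopA G [i] p.1 p.2                            -- Q.append(i); while Q: …
      else p)
    (init, 0)
  r.1.map (fun o => o.getD 0)   -- under Pre_ every cell is filled; getD 0 only totalizes

-- ===== PORT B =====

/-- Number of still-unseen flags (B's termination measure, first component). -/
def pvUnseen (S : List Bool) : Nat := S.countP (fun b => !b)

/-- Weight of the frame stack (B's termination measure, second component). -/
def pvFW (F : List (Int × Int)) : Nat := (F.map (fun p => (p.2 + 1).toNat + 1)).sum

/-- `v = G[u][k]`: k always lies in range (len(G[u])-1 down to 0), so the default is unused. -/
def pvNbr (G : List (List Int)) (u k : Int) : Int :=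
  PySem.List.pyGetD (PySem.List.pyGetD G u []) k 0

/-- The `while frames:` loop of B. A frame (u, k) stands for vertex u whose neighbours
G[u][k], G[u][k-1], …, G[u][0] are still pending; k < 0 means the frame is exhausted.
An out-of-range `seen[v]` (Python's IndexError, excluded by `Pre_`) stops with the
current state. -/
def pvRunB (G : List (List Int)) (F : List (Int × Int)) (S : List Bool) (O : List Int) :
    List Bool × List Int :=
  match F with
  | [] => (S, O)
  | (u, k) :: F' =>
    if k < 0 then pvRunB G F' S O                        -- frames.pop()
    else
      match h : PySem.List.pyGet? S (pvNbr G u k) with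
      | none => (S, O)                                   -- IndexError: seen[v]
      | some true => pvRunB G ((u, k - 1) :: F') S O     -- already seen: just step k down
      | some false =>                                    -- seen[v] = True; order.append(v)
          pvRunB G ((pvNbr G u k, ((PySem.List.pyGetD G (pvNbr G u k) []).length : Int) - 1)
              :: (u, k - 1) :: F')
            (PySem.List.pySetD S (pvNbr G u k) true) (O ++ [pvNbr G u k])
  termination_by (pvUnseen S, pvFW F)
  decreasing_by
  · exact Prod.Lex.right _ (by simp only [pvFW, List.map_cons, List.sum_cons]; omega)
  · exact Prod.Lex.right _ (by simp only [pvFW, List.map_cons, List.sum_cons]; omega)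
  · exact Prod.Lex.left _ _ (pvCountP_pySetD_lt _ S (pvNbr G u k) false true h rfl rfl)

def vertices_with_time_alt (G : List (List Int)) : List Int :=
  let n := G.length
  let r := (PySem.List.pyRange 0 n 1).foldl
    (fun p s =>
      if PySem.List.pyGetD p.1 s false then p            -- if seen[s]: continue
      else
        pvRunB G [(s, ((PySem.List.pyGetD G s []).length : Int) - 1)]
          (PySem.List.pySetD p.1 s true) (p.2 ++ [s]))
    (List.replicate n false, ([] : List Int))            -- seen = [False]*n; order = []
  (PySem.List.enumerate r.2 0).foldl                     -- for time, u in enumerate(order):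
    (fun V q => PySem.List.pySetD V q.2 q.1)             --   V[u] = time
    (List.replicate n (0 : Int))                         -- V = [0]*n

-- ===== PRECONDITION & SPEC =====
-- Pre_ excludes exactly the graphs with an adjacency entry that is not a valid Python index
-- into G: the outer loop reaches every vertex, so A raises IndexError on every such graph.
def Pre_vertices_with_time (G : List (List Int)) : Prop :=
  ∀ l ∈ G, ∀ v ∈ l, -(G.length : Int) ≤ v ∧ v < (G.length : Int)
instance (G : List (List Int)) : Decidable (Pre_vertices_with_time G) := by
  unfold Pre_vertices_with_time; infer_instance
def pvWitness_vertices_with_time : List (List Int) := [[1, -1], [0], [2, 0]]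

def Spec_vertices_with_time (G : List (List Int)) (out : List Int) : Prop :=
  out = vertices_with_time_alt G
instance (G : List (List Int)) (out : List Int) : Decidable (Spec_vertices_with_time G out) := by
  unfold Spec_vertices_with_time; infer_instance

-- ===== CLAIM (what is proved, stated in full; the proofs are below) =====
def Claim_equal_vertices_with_time : Prop :=
  ∀ (G : List (List Int)), Dom_vertices_with_time G → Pre_vertices_with_time G →
    Spec_vertices_with_time G (vertices_with_time G)

-- ===== LEMMAS AND PROOFS =====

/-- The timer array A maintains, reconstructed from B's discovery order. -/
def pvVof (n : Nat) (O : List Int) : List (Option Int) :=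
  (PySem.List.enumerate O 0).foldl
    (fun V q => PySem.List.pySetD V q.2 (some q.1)) (List.replicate n none)

theorem pv_map_pySetD {α β : Type} (f : α → β) (xs : List α) (i : Int) (x : α) :
    (PySem.List.pySetD xs i x).map f = PySem.List.pySetD (xs.map f) i (f x) := by
  unfold PySem.List.pySetD PySem.List.pySet?
  rw [List.length_map]
  cases PySem.List.pyIdx? xs.length i <;> simp [List.map_set]

theorem pv_pyGet?_map {α β : Type} (f : α → β) (xs : List α) (i : Int) :
    PySem.List.pyGet? (xs.map f) i = (PySem.List.pyGet? xs i).map f := by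
  unfold PySem.List.pyGet?
  rw [List.length_map]
  cases PySem.List.pyIdx? xs.length i <;> simp

theorem pv_length_foldl_pySetD {α : Type} (L : List (Int × Int)) (g : Int × Int → α)
    (V : List α) :
    (L.foldl (fun V q => PySem.List.pySetD V q.2 (g q)) V).length = V.length := by
  induction L generalizing V with
  | nil => rfl
  | cons p L ih => simp [ih, PySem.List.length_pySetD]

theorem pvVof_length (n : Nat) (O : List Int) : (pvVof n O).length = n := by
  unfold pvVof
  rw [pv_length_foldl_pySetD _ (fun q => some q.1), List.length_replicate]

theorem pvVof_append (n : Nat) (O : List Int) (v : Int) :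
    pvVof n (O ++ [v]) = PySem.List.pySetD (pvVof n O) v (some (O.length : Int)) := by
  unfold pvVof
  rw [PySem.List.enumerate_append, List.foldl_append]
  simp [PySem.List.enumerate_cons, PySem.List.enumerate_nil]

/-- Mapping the scatter fold: timestamps through `Option.getD 0`. -/
theorem pvScatter_eq (L : List (Int × Int)) (V0 : List (Option Int)) :
    (L.foldl (fun V q => PySem.List.pySetD V q.2 (some q.1)) V0).map (fun o => o.getD 0)
      = L.foldl (fun V q => PySem.List.pySetD V q.2 q.1) (V0.map (fun o => o.getD 0)) := by
  induction L generalizing V0 with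
  | nil => rfl
  | cons p L ih => simp only [List.foldl_cons, ih, pv_map_pySetD, Option.getD_some]

/-- The flat stack of A that a frame stack of B stands for. -/
def pvFlat (G : List (List Int)) (F : List (Int × Int)) : List Int :=
  F.flatMap (fun p => ((PySem.List.pyGetD G p.1 []).take (p.2 + 1).toNat).reverse)

theorem pvFlat_cons_neg (G : List (List Int)) (u k : Int) (F : List (Int × Int))
    (hk : k < 0) : pvFlat G ((u, k) :: F) = pvFlat G F := by
  unfold pvFlat
  have h0 : (k + 1).toNat = 0 := by omega
  simp [h0]

theorem pvFlat_cons_pos (G : List (List Int)) (u k : Int) (F : List (Int × Int))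
    (hk : 0 ≤ k) (hlt : k < ((PySem.List.pyGetD G u []).length : Int)) :
    pvFlat G ((u, k) :: F) = pvNbr G u k :: pvFlat G ((u, k - 1) :: F) := by
  unfold pvFlat pvNbr
  simp only [List.flatMap_cons]
  have h1 : (k + 1).toNat = k.toNat + 1 := by omega
  have h2 : (k - 1 + 1).toNat = k.toNat := by omega
  have h3 : k.toNat < (PySem.List.pyGetD G u []).length := by omega
  have hrev : (List.take (k.toNat + 1) (PySem.List.pyGetD G u [])).reverse
      = (PySem.List.pyGetD G u [])[k.toNat]
          :: (List.take k.toNat (PySem.List.pyGetD G u [])).reverse := by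
    rw [List.take_add_one, List.getElem?_eq_getElem h3]
    simp
  rw [h1, h2, hrev, PySem.List.pyGetD_eq_getElem _ _ hk hlt]
  simp

theorem pvFlat_cons_full (G : List (List Int)) (v : Int) (F : List (Int × Int)) :
    pvFlat G ((v, ((PySem.List.pyGetD G v []).length : Int) - 1) :: F)
      = (PySem.List.pyGetD G v []).reverse ++ pvFlat G F := by
  unfold pvFlat
  simp only [List.flatMap_cons]
  have h1 : (((PySem.List.pyGetD G v []).length : Int) - 1 + 1).toNat
      = (PySem.List.pyGetD G v []).length := by omega
  rw [h1, List.take_length]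

/-- Bisimulation: B's frame machine over (seen, order) runs in lock step with A's flat
stack machine over (timer array, timer), the states related by `pvVof` / `Option.isSome`. -/
theorem pvRunB_bisim (G : List (List Int)) (F : List (Int × Int)) (S : List Bool)
    (O : List Int) :
    S = (pvVof G.length O).map Option.isSome →
    (∀ p ∈ F, p.2 < ((PySem.List.pyGetD G p.1 []).length : Int)) →
    pvLoopA G (pvFlat G F) (pvVof G.length O) (O.length : Int)
      = (pvVof G.length (pvRunB G F S O).2, ((pvRunB G F S O).2.length : Int))
    ∧ (pvRunB G F S O).1 = (pvVof G.length (pvRunB G F S O).2).map Option.isSome := by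
  fun_induction pvRunB G F S O with
  | case1 S O =>
    intro hS hF
    refine ⟨?_, hS⟩
    simp [pvFlat, pvLoopA]
  | case2 S O u k F' hneg ih =>
    intro hS hF
    rw [pvFlat_cons_neg G u k F' hneg]
    exact ih hS (fun p hp => hF p (List.mem_cons_of_mem _ hp))
  | case3 S O u k F' hneg h =>
    intro hS hF
    have hk : (0 : Int) ≤ k := by omega
    have hlt : k < ((PySem.List.pyGetD G u []).length : Int) := hF (u, k) List.mem_cons_self
    have hA : PySem.List.pyGet? (pvVof G.length O) (pvNbr G u k) = none := by
      rw [hS, pv_pyGet?_map] at h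
      cases hx : PySem.List.pyGet? (pvVof G.length O) (pvNbr G u k) with
      | none => rfl
      | some o => rw [hx] at h; simp at h
    refine ⟨?_, hS⟩
    rw [pvFlat_cons_pos G u k F' hk hlt, pvLoopA]
    split <;> simp_all
  | case4 S O u k F' hneg h ih =>
    intro hS hF
    have hk : (0 : Int) ≤ k := by omega
    have hlt : k < ((PySem.List.pyGetD G u []).length : Int) := hF (u, k) List.mem_cons_self
    have hA : ∃ w, PySem.List.pyGet? (pvVof G.length O) (pvNbr G u k) = some (some w) := by
      rw [hS, pv_pyGet?_map] at h
      cases hx : PySem.List.pyGet? (pvVof G.length O) (pvNbr G u k) with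
      | none => rw [hx] at h; simp at h
      | some o =>
        cases o with
        | none => rw [hx] at h; simp at h
        | some w => exact ⟨w, rfl⟩
    have hF' : ∀ p ∈ (u, k - 1) :: F',
        p.2 < ((PySem.List.pyGetD G p.1 []).length : Int) := by
      intro p hp
      rcases List.mem_cons.mp hp with rfl | hp'
      · simpa using by omega
      · exact hF p (List.mem_cons_of_mem _ hp')
    obtain ⟨ih1, ih2⟩ := ih hS hF'
    obtain ⟨w, hw⟩ := hA
    refine ⟨?_, ih2⟩
    rw [pvFlat_cons_pos G u k F' hk hlt, pvLoopA]
    split <;> simp_all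
  | case5 S O u k F' hneg h ih =>
    intro hS hF
    have hk : (0 : Int) ≤ k := by omega
    have hlt : k < ((PySem.List.pyGetD G u []).length : Int) := hF (u, k) List.mem_cons_self
    have hA : PySem.List.pyGet? (pvVof G.length O) (pvNbr G u k) = some none := by
      rw [hS, pv_pyGet?_map] at h
      cases hx : PySem.List.pyGet? (pvVof G.length O) (pvNbr G u k) with
      | none => rw [hx] at h; simp at h
      | some o =>
        cases o with
        | none => rfl
        | some w => rw [hx] at h; simp at h
    have hS' : PySem.List.pySetD S (pvNbr G u k) true
        = List.map Option.isSome (pvVof G.length (O ++ [pvNbr G u k])) := by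
      rw [pvVof_append, pv_map_pySetD, ← hS]
      simp
    have hF' : ∀ p ∈ (pvNbr G u k, ((PySem.List.pyGetD G (pvNbr G u k) []).length : Int) - 1)
          :: (u, k - 1) :: F',
        p.2 < ((PySem.List.pyGetD G p.1 []).length : Int) := by
      intro p hp
      rcases List.mem_cons.mp hp with rfl | hp'
      · simp
      · rcases List.mem_cons.mp hp' with rfl | hp''
        · simpa using by omega
        · exact hF p (List.mem_cons_of_mem _ hp'')
    obtain ⟨ih1, ih2⟩ := ih hS' hF'
    rw [pvFlat_cons_full, pvVof_append] at ih1
    refine ⟨?_, ih2⟩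
    rw [pvFlat_cons_pos G u k F' hk hlt, pvLoopA]
    split <;> simp_all

/-- The outer `for i in range(len(G))` loops of A and B, run in lock step. -/
theorem pvFoldInv (G : List (List Int)) (L : List Int) (S : List Bool) (O : List Int)
    (hS : S = (pvVof G.length O).map Option.isSome)
    (hL : ∀ i ∈ L, 0 ≤ i ∧ i < (G.length : Int)) :
    L.foldl (fun p i =>
        if PySem.List.pyGetD p.1 i none = none then pvLoopA G [i] p.1 p.2 else p)
        (pvVof G.length O, (O.length : Int))
      = (pvVof G.length ((L.foldl (fun p s =>
            if PySem.List.pyGetD p.1 s false then p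
            else pvRunB G [(s, ((PySem.List.pyGetD G s []).length : Int) - 1)]
              (PySem.List.pySetD p.1 s true) (p.2 ++ [s])) (S, O)).2),
         (((L.foldl (fun p s =>
            if PySem.List.pyGetD p.1 s false then p
            else pvRunB G [(s, ((PySem.List.pyGetD G s []).length : Int) - 1)]
              (PySem.List.pySetD p.1 s true) (p.2 ++ [s])) (S, O)).2).length : Int))
    ∧ (L.foldl (fun p s =>
            if PySem.List.pyGetD p.1 s false then p
            else pvRunB G [(s, ((PySem.List.pyGetD G s []).length : Int) - 1)]
              (PySem.List.pySetD p.1 s true) (p.2 ++ [s])) (S, O)).1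
        = (pvVof G.length ((L.foldl (fun p s =>
            if PySem.List.pyGetD p.1 s false then p
            else pvRunB G [(s, ((PySem.List.pyGetD G s []).length : Int) - 1)]
              (PySem.List.pySetD p.1 s true) (p.2 ++ [s])) (S, O)).2)).map Option.isSome := by
  induction L generalizing S O with
  | nil => exact ⟨rfl, hS⟩
  | cons i L' ih =>
    obtain ⟨h0, hlt⟩ := hL i List.mem_cons_self
    have hlen : (pvVof G.length O).length = G.length := pvVof_length _ _
    have hlt' : i < ((pvVof G.length O).length : Int) := by rw [hlen]; exact hlt
    have hVi : PySem.List.pyGetD (pvVof G.length O) i none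
        = (pvVof G.length O)[i.toNat] :=
      PySem.List.pyGetD_eq_getElem _ _ h0 hlt'
    have hltS : i < ((List.map Option.isSome (pvVof G.length O)).length : Int) := by
      rw [List.length_map]; exact hlt'
    have hnat : i.toNat < (pvVof G.length O).length := by omega
    have hSi : PySem.List.pyGetD S i false
        = ((pvVof G.length O)[i.toNat]).isSome := by
      rw [hS, PySem.List.pyGetD_eq_getElem _ _ h0 hltS, List.getElem_map]
    simp only [List.foldl_cons]
    by_cases hc : (pvVof G.length O)[i.toNat] = none
    · have hgi : PySem.List.pyGet? (pvVof G.length O) i = some none := by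
        rw [PySem.List.pyGet?_eq_some_getElem _ h0 hlt', hc]
      have hS' : PySem.List.pySetD S i true
          = List.map Option.isSome (pvVof G.length (O ++ [i])) := by
        rw [pvVof_append, pv_map_pySetD, ← hS]
        simp
      have hB := pvRunB_bisim G [(i, ((PySem.List.pyGetD G i []).length : Int) - 1)]
        (PySem.List.pySetD S i true) (O ++ [i]) hS'
        (by intro p hp
            rcases List.mem_cons.mp hp with rfl | hp'
            · simp
            · simp at hp')
      rw [pvFlat_cons_full, pvVof_append] at hB
      have hstep : pvLoopA G [i] (pvVof G.length O) (O.length : Int)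
          = (pvVof G.length ((pvRunB G [(i, ((PySem.List.pyGetD G i []).length : Int) - 1)]
              (PySem.List.pySetD S i true) (O ++ [i])).2),
             (((pvRunB G [(i, ((PySem.List.pyGetD G i []).length : Int) - 1)]
              (PySem.List.pySetD S i true) (O ++ [i])).2).length : Int)) := by
        rw [pvLoopA]
        split <;> simp_all [pvFlat]
      rw [hVi, hc, hSi, hc, if_pos rfl]
      simp only [Option.isSome_none, Bool.false_eq_true, if_false]
      rw [hstep]
      exact ih _ _ hB.2 (fun j hj => hL j (List.mem_cons_of_mem _ hj))
    · rw [hVi, if_neg hc, hSi]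
      have : ((pvVof G.length O)[i.toNat]).isSome = true := by
        cases hx : (pvVof G.length O)[i.toNat] with
        | none => exact absurd hx hc
        | some w => rfl
      rw [this, if_pos rfl]
      exact ih _ _ hS (fun j hj => hL j (List.mem_cons_of_mem _ hj))


-- ===== VERDICT (by name: the statement is the Claim_ definition above) =====
theorem vertices_with_time_spec : Claim_equal_vertices_with_time := by
  intro G _ _
  unfold Spec_vertices_with_time vertices_with_time vertices_with_time_alt
  dsimp only
  have hinit : G.map (fun _ => (none : Option Int)) = pvVof G.length [] := by
    simp [pvVof, PySem.List.enumerate_nil, List.map_const']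
  have hinitB : List.replicate G.length false
      = (pvVof G.length []).map Option.isSome := by
    simp [pvVof, PySem.List.enumerate_nil, List.map_replicate]
  have hmem : ∀ i ∈ PySem.List.pyRange 0 G.length 1, 0 ≤ i ∧ i < (G.length : Int) := by
    intro i hi
    rw [PySem.List.mem_pyRange_one] at hi
    exact hi
  rw [hinit, hinitB]
  have h := pvFoldInv G (PySem.List.pyRange 0 G.length 1)
    ((pvVof G.length []).map Option.isSome) [] rfl hmem
  simp only [List.length_nil, Nat.cast_zero] at h
  rw [h.1]
  unfold pvVof
  rw [pvScatter_eq]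
  simp [List.map_replicate]
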